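-- pv_equiv track=rewrite | github.com/aryanghi/Genetic-algorithm | code.py | survival_selection
-- ===== SOURCE A (Python) =====
-- def fitness(A):
--     x=0
--     for i in range(len(A)):
--         for j in range(i):
--             if (abs(A[j]-A[i])==i-j):
--                 x=x+1
--             if(A[j]==A[i]):
--                 x=x+1
--     return(x)
--
-- def survival_selection(A):
--     fit=[]
--     for i in range(len(A)):
--         x=fitness(A[i])
--         fit.append((x,A[i]))
--     fit=sorted(fit)
--     A=fit[:-2]
--
--     tmp=A
--     A=[]
--     for i in range(len(tmp)):
--         A.append(tmp[i][1])
--     return(A)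
-- ===== SOURCE B (Python) =====
-- def _conflicts(board):
--     d1 = {}
--     d2 = {}
--     d3 = {}
--     x = 0
--     for i, v in enumerate(board):
--         k1 = v - i
--         k2 = v + i
--         x += d1.get(k1, 0) + d2.get(k2, 0) + d3.get(v, 0)
--         d1[k1] = d1.get(k1, 0) + 1
--         d2[k2] = d2.get(k2, 0) + 1
--         d3[v] = d3.get(v, 0) + 1
--     return x
--
-- def survival_selection(A):
--     fit = sorted((_conflicts(b), b) for b in A)
--     return [b for _, b in fit[:-2]]
-- ===== Notes on version B (the rewrite author's own statement) =====
-- stated objective: faster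
-- what changed: fitness is computed in one pass per board with three dict counters (value-index, value+index, value) instead of the O(n^2) all-pairs double loop, and the selection is a comprehension over the sorted pairs
import Mathlib
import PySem

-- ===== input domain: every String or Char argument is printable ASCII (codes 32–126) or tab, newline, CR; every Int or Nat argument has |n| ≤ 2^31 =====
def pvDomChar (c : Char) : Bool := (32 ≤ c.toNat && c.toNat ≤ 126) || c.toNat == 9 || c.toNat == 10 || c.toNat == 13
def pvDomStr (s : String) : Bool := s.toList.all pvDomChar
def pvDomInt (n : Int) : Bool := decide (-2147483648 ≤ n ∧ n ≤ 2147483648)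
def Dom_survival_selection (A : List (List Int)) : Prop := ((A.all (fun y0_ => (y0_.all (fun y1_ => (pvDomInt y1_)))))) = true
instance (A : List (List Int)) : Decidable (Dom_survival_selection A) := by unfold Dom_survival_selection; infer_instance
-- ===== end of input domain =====

-- B replaces A's O(n^2) all-pairs fitness loop by a one-pass dict-counter count per board (asymptotically faster); same selection result.

-- ===== PORT A =====
-- fitness(A): the nested all-pairs loop
def pv_fitness (A : List Int) : Int :=
  (PySem.List.pyRange 0 (PySem.List.len A) 1).foldl (fun x i =>
    (PySem.List.pyRange 0 i 1).foldl (fun x j =>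
      let x := if |PySem.List.pyGetD A j 0 - PySem.List.pyGetD A i 0| = i - j then x + 1 else x
      if PySem.List.pyGetD A j 0 = PySem.List.pyGetD A i 0 then x + 1 else x) x) 0

def survival_selection (A : List (List Int)) : List (List Int) :=
  let fit := (PySem.List.pyRange 0 (PySem.List.len A) 1).foldl
      (fun fit i => fit ++ [(pv_fitness (PySem.List.pyGetD A i []), PySem.List.pyGetD A i [])]) []
  let fit := PySem.List.sorted2 fit (·.1) (·.2)
  let A2 := PySem.List.slice fit none (some (-2))
  (PySem.List.pyRange 0 (PySem.List.len A2) 1).foldl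
      (fun acc i => acc ++ [(PySem.List.pyGetD A2 i (0, [])).2]) []

-- ===== PORT B =====
-- _conflicts(board): one pass, three dict counters
def pv_conflicts (board : List Int) : Int :=
  let s := (PySem.List.enumerate board 0).foldl
    (fun (s : PySem.Dict Int Int × PySem.Dict Int Int × PySem.Dict Int Int × Int) p =>
      let d1 := s.1; let d2 := s.2.1; let d3 := s.2.2.1; let x := s.2.2.2
      let i := p.1; let v := p.2
      let k1 := v - i
      let k2 := v + i
      let x := x + d1.getD k1 0 + d2.getD k2 0 + d3.getD v 0
      (d1.insert k1 (d1.getD k1 0 + 1), d2.insert k2 (d2.getD k2 0 + 1),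
       d3.insert v (d3.getD v 0 + 1), x))
    (PySem.Dict.empty, PySem.Dict.empty, PySem.Dict.empty, 0)
  s.2.2.2

def survival_selection_alt (A : List (List Int)) : List (List Int) :=
  let fit := PySem.List.sorted2 (A.map (fun b => (pv_conflicts b, b))) (·.1) (·.2)
  (PySem.List.slice fit none (some (-2))).map (·.2)

-- ===== PRECONDITION & SPEC =====
def Spec_survival_selection (A : List (List Int)) (out : List (List Int)) : Prop := out = survival_selection_alt A
instance (A : List (List Int)) (out : List (List Int)) : Decidable (Spec_survival_selection A out) := by unfold Spec_survival_selection; infer_instance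

-- ===== CLAIM (what is proved, stated in full; the proofs are below) =====
def Claim_equal_survival_selection : Prop := ∀ (A : List (List Int)), Dom_survival_selection A → Spec_survival_selection A (survival_selection A)



-- ===== LEMMAS AND PROOFS =====

-- B's loop step and fold, named for the proofs
def bstep (s : PySem.Dict Int Int × PySem.Dict Int Int × PySem.Dict Int Int × Int) (p : Int × Int) :
    PySem.Dict Int Int × PySem.Dict Int Int × PySem.Dict Int Int × Int :=
  let d1 := s.1; let d2 := s.2.1; let d3 := s.2.2.1; let x := s.2.2.2
  let i := p.1; let v := p.2
  let k1 := v - i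
  let k2 := v + i
  let x := x + d1.getD k1 0 + d2.getD k2 0 + d3.getD v 0
  (d1.insert k1 (d1.getD k1 0 + 1), d2.insert k2 (d2.getD k2 0 + 1),
   d3.insert v (d3.getD v 0 + 1), x)

def bfold (xs : List Int) : PySem.Dict Int Int × PySem.Dict Int Int × PySem.Dict Int Int × Int :=
  (PySem.List.enumerate xs 0).foldl bstep (PySem.Dict.empty, PySem.Dict.empty, PySem.Dict.empty, 0)

lemma pv_conflicts_eq_bfold (xs : List Int) : pv_conflicts xs = (bfold xs).2.2.2 := rfl

-- A's inner and outer loops, named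
def innerA (A : List Int) (i : Int) (x0 : Int) : Int :=
  (PySem.List.pyRange 0 i 1).foldl (fun x j =>
    let x := if |PySem.List.pyGetD A j 0 - PySem.List.pyGetD A i 0| = i - j then x + 1 else x
    if PySem.List.pyGetD A j 0 = PySem.List.pyGetD A i 0 then x + 1 else x) x0

def outerA (A : List Int) : Int :=
  (PySem.List.pyRange 0 (PySem.List.len A) 1).foldl (fun x i => innerA A i x) 0

lemma pv_fitness_eq_outerA (A : List Int) : pv_fitness A = outerA A := rfl

lemma getD_app_lt (xs : List Int) (v j : Int) (h0 : 0 ≤ j) (h : j < (xs.length : Int)) :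
    PySem.List.pyGetD (xs ++ [v]) j 0 = PySem.List.pyGetD xs j 0 := by
  obtain ⟨m, rfl⟩ : ∃ m : Nat, j = (m : Int) := ⟨j.toNat, (Int.toNat_of_nonneg h0).symm⟩
  have hm : m < xs.length := by exact_mod_cast h
  rw [PySem.List.pyGetD_natCast, PySem.List.pyGetD_natCast]
  simp [List.getD_eq_getElem?_getD, List.getElem?_append_left hm]

lemma getD_app_self (xs : List Int) (v : Int) :
    PySem.List.pyGetD (xs ++ [v]) (xs.length : Int) 0 = v := by
  rw [PySem.List.pyGetD_natCast]
  simp [List.getD_eq_getElem?_getD]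

lemma cnt_eq_sum (xs : List Int) (q : Int × Int → Bool) :
    ((PySem.List.enumerate xs 0).countP q : Int) =
    ((PySem.List.pyRange 0 (xs.length : Int) 1).map
      (fun j => if q (j, PySem.List.pyGetD xs j 0) then (1:Int) else 0)).sum := by
  rw [PySem.List.enumerate_eq_map_pyRange (d := 0), List.countP_map,
      ← PySem.List.sum_map_ite_one_zero]
  simp only [PySem.List.len_eq, Function.comp]
  congr 1

lemma innerA_app (xs : List Int) (v i x0 : Int) (h0 : 0 ≤ i) (hn : i < (xs.length : Int)) :
    innerA (xs ++ [v]) i x0 = innerA xs i x0 := by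
  unfold innerA
  apply PySem.List.foldl_congr_mem
  intro x j hj
  obtain ⟨hj0, hji⟩ := PySem.List.mem_pyRange_one.mp hj
  simp only [getD_app_lt xs v j hj0 (by omega), getD_app_lt xs v i h0 hn]

lemma innerA_last (xs : List Int) (v x0 : Int) :
    innerA (xs ++ [v]) (xs.length : Int) x0 = x0
      + ((PySem.List.enumerate xs 0).countP (fun p => decide (p.2 - p.1 = v - (xs.length : Int))) : Int)
      + ((PySem.List.enumerate xs 0).countP (fun p => decide (p.2 + p.1 = v + (xs.length : Int))) : Int)
      + ((PySem.List.enumerate xs 0).countP (fun p => decide (p.2 = v)) : Int) := by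
  have hstep : innerA (xs ++ [v]) (xs.length : Int) x0 =
      (PySem.List.pyRange 0 (xs.length : Int) 1).foldl (fun x j => x +
        ((if PySem.List.pyGetD xs j 0 - j = v - (xs.length : Int) then (1:Int) else 0) +
         (if PySem.List.pyGetD xs j 0 + j = v + (xs.length : Int) then (1:Int) else 0) +
         (if PySem.List.pyGetD xs j 0 = v then (1:Int) else 0))) x0 := by
    unfold innerA
    apply PySem.List.foldl_congr_mem
    intro x j hj
    obtain ⟨hj0, hjn⟩ := PySem.List.mem_pyRange_one.mp hj
    simp only [getD_app_lt xs v j hj0 hjn, getD_app_self xs v]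
    rcases abs_cases (PySem.List.pyGetD xs j 0 - v) with ⟨h1, h2⟩ | ⟨h1, h2⟩ <;>
      rw [h1] <;> split_ifs <;> omega
  rw [hstep, PySem.List.foldl_add]
  rw [cnt_eq_sum, cnt_eq_sum, cnt_eq_sum]
  rw [PySem.List.sum_map_add_int
        (f := fun j => (if PySem.List.pyGetD xs j 0 - j = v - (xs.length : Int) then (1:Int) else 0) +
          (if PySem.List.pyGetD xs j 0 + j = v + (xs.length : Int) then (1:Int) else 0))
        (g := fun j => (if PySem.List.pyGetD xs j 0 = v then (1:Int) else 0)),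
      PySem.List.sum_map_add_int
        (f := fun j => (if PySem.List.pyGetD xs j 0 - j = v - (xs.length : Int) then (1:Int) else 0))
        (g := fun j => (if PySem.List.pyGetD xs j 0 + j = v + (xs.length : Int) then (1:Int) else 0))]
  simp only [decide_eq_true_eq]
  ring

lemma pv_fitness_append (xs : List Int) (v : Int) :
    pv_fitness (xs ++ [v]) = pv_fitness xs
      + ((PySem.List.enumerate xs 0).countP (fun p => decide (p.2 - p.1 = v - (xs.length : Int))) : Int)
      + ((PySem.List.enumerate xs 0).countP (fun p => decide (p.2 + p.1 = v + (xs.length : Int))) : Int)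
      + ((PySem.List.enumerate xs 0).countP (fun p => decide (p.2 = v)) : Int) := by
  rw [pv_fitness_eq_outerA, pv_fitness_eq_outerA]
  unfold outerA
  have hlen : PySem.List.len (xs ++ [v]) = (xs.length : Int) + 1 := by
    simp [PySem.List.len_eq]
  rw [hlen, PySem.List.pyRange_one_succ_right (by exact_mod_cast xs.length.zero_le),
      List.foldl_append]
  simp only [List.foldl_cons, List.foldl_nil, PySem.List.len_eq]
  have hpre : (PySem.List.pyRange 0 (xs.length : Int) 1).foldl
        (fun x i => innerA (xs ++ [v]) i x) 0 =
      (PySem.List.pyRange 0 (xs.length : Int) 1).foldl (fun x i => innerA xs i x) 0 := by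
    apply PySem.List.foldl_congr_mem
    intro acc i hi
    obtain ⟨hi0, hin⟩ := PySem.List.mem_pyRange_one.mp hi
    exact innerA_app xs v i acc hi0 hin
  rw [hpre, innerA_last]

lemma bfold_inv (xs : List Int) :
    (∀ k, ((bfold xs).1.getD k 0) = ((PySem.List.enumerate xs 0).countP (fun p => decide (p.2 - p.1 = k)) : Int)) ∧
    (∀ k, ((bfold xs).2.1.getD k 0) = ((PySem.List.enumerate xs 0).countP (fun p => decide (p.2 + p.1 = k)) : Int)) ∧
    (∀ k, ((bfold xs).2.2.1.getD k 0) = ((PySem.List.enumerate xs 0).countP (fun p => decide (p.2 = k)) : Int)) ∧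
    (bfold xs).2.2.2 = pv_fitness xs := by
  induction xs using List.reverseRecOn with
  | nil =>
    refine ⟨?_, ?_, ?_, ?_⟩ <;>
      simp [bfold, pv_fitness, PySem.List.enumerate_nil, PySem.Dict.getD_empty,
        PySem.List.len_eq, PySem.List.pyRange_zero]
  | append_singleton xs v IH =>
    obtain ⟨ih1, ih2, ih3, ihx⟩ := IH
    have hb : bfold (xs ++ [v]) = bstep (bfold xs) ((xs.length : Int), v) := by
      unfold bfold
      rw [PySem.List.enumerate_append, List.foldl_append]
      simp [PySem.List.enumerate_cons, PySem.List.enumerate_nil]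
    have hen : PySem.List.enumerate (xs ++ [v]) 0 =
        PySem.List.enumerate xs 0 ++ [((xs.length : Int), v)] := by
      rw [PySem.List.enumerate_append]
      simp [PySem.List.enumerate_cons, PySem.List.enumerate_nil]
    refine ⟨?_, ?_, ?_, ?_⟩
    · intro k
      rw [hb, hen]
      simp only [bstep, PySem.Dict.getD_insert, List.countP_append, List.countP_cons,
        List.countP_nil]
      by_cases hk : k = v - (xs.length : Int)
      · simp [hk, ih1]
      · have : (decide (v - (xs.length : Int) = k)) = false := by simp; omega
        simp [hk, ih1, this]
    · intro k
      rw [hb, hen]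
      simp only [bstep, PySem.Dict.getD_insert, List.countP_append, List.countP_cons,
        List.countP_nil]
      by_cases hk : k = v + (xs.length : Int)
      · simp [hk, ih2]
      · have : (decide (v + (xs.length : Int) = k)) = false := by simp; omega
        simp [hk, ih2, this]
    · intro k
      rw [hb, hen]
      simp only [bstep, PySem.Dict.getD_insert, List.countP_append, List.countP_cons,
        List.countP_nil]
      by_cases hk : k = v
      · simp [hk, ih3]
      · have : (decide (v = k)) = false := by simp; omega
        simp [hk, ih3, this]
    · rw [hb]
      simp only [bstep]
      rw [ihx, ih1, ih2, ih3, pv_fitness_append]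
      try ring

theorem fitness_eq_conflicts (xs : List Int) : pv_fitness xs = pv_conflicts xs := by
  rw [pv_conflicts_eq_bfold, (bfold_inv xs).2.2.2]

-- ===== VERDICT (by name: the statement is the Claim_ definition above) =====
theorem survival_selection_spec : Claim_equal_survival_selection := by
  intro A _
  unfold Spec_survival_selection survival_selection survival_selection_alt
  rw [PySem.List.foldl_pyRange_zero_pyGetD A ([] : List Int)
        (fun acc b => acc ++ [(pv_fitness b, b)]) []]
  have h1 : List.foldl (fun acc b => acc ++ [(pv_fitness b, b)]) ([] : List (Int × List Int)) A
      = A.map (fun b => (pv_conflicts b, b)) := by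
    rw [PySem.List.foldl_append_singleton_eq_map]
    simp [fitness_eq_conflicts]
  rw [h1]
  set A2 := PySem.List.slice (PySem.List.sorted2 (A.map fun b => (pv_conflicts b, b)) (·.1) (·.2)) none (some (-2)) with hA2
  rw [PySem.List.foldl_pyRange_zero_pyGetD A2 ((0 : Int), ([] : List Int))
        (fun acc p => acc ++ [p.2]) []]
  rw [PySem.List.foldl_append_singleton_eq_map]
  rfl
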